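-- pv_equiv track=rewrite | github.com/UVT-CTF/cyberhackday2024 | OneWayOut/private/source.py | genMaze
-- ===== SOURCE A (Python) =====
-- def genMaze(sol):
--     i = 0
--     j = 0
--     imin = 0
--     jmin = 0
--     imax = 0
--     jmax = 0
--     moves = [[0, 0]]
--     for x in sol:
--         match x:
--             case 0:
--                 j -= 1
--                 moves.append([i, j])
--                 if jmin > j:
--                     jmin = j
--             case 1:
--                 j += 1
--                 moves.append([i, j])
--                 if jmax < j:
--                     jmax = j
--             case 2:
--                 i -= 1
--                 moves.append([i, j])
--                 if imin > i:
--                     imin = i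
--             case 3:
--                 i += 1
--                 moves.append([i, j])
--                 if imax < i:
--                     imax = i
--
--     if imin < 0:
--         for k in range(len(moves)):
--             moves[k][0] -= imin
--         imax -= imin
--
--     if jmin < 0:
--         for k in range(len(moves)):
--             moves[k][1] -= jmin
--         jmax -= jmin
--
--     maze = []
--     for k in range(imax + 1):
--         maze.append([0]*(jmax + 1))
--
--     for i, j in moves:
--         maze[i][j] = 1
--
--     i, j = moves[0]
--     maze[i][j] = 8
--
--     return maze
-- ===== SOURCE B (Python) =====
-- def genMaze(sol):
--     # walk with a delta table into a SET of visited cells (dedup), then build the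
--     # grid directly by membership tests -- no moves list, no shift pass, no painting.
--     DELTA = {0: (0, -1), 1: (0, 1), 2: (-1, 0), 3: (1, 0)}
--     cells = {(0, 0)}
--     i = 0
--     j = 0
--     for x in sol:
--         if x in DELTA:
--             di, dj = DELTA[x]
--             i += di
--             j += dj
--             cells.add((i, j))
--     imin = min(a for a, _ in cells)
--     imax = max(a for a, _ in cells)
--     jmin = min(b for _, b in cells)
--     jmax = max(b for _, b in cells)
--     return [[8 if (r + imin, c + jmin) == (0, 0)
--              else 1 if (r + imin, c + jmin) in cells else 0
--              for c in range(jmax - jmin + 1)]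
--             for r in range(imax - imin + 1)]
-- ===== Notes on version B (the rewrite author's own statement) =====
-- stated objective: alternative
-- what changed: A traces a mutable moves list while maintaining four running extrema, then conditionally shifts all coordinates in place, allocates a zero grid and paints 1s/8 into it by index assignment; B instead walks via a delta dictionary into a deduplicating SET of absolute cells, computes the extrema afterwards, and constructs the grid in one comprehension by membership tests against that set (start cell decided inline), with no coordinate shifting or grid mutation at all.
import Mathlib
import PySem

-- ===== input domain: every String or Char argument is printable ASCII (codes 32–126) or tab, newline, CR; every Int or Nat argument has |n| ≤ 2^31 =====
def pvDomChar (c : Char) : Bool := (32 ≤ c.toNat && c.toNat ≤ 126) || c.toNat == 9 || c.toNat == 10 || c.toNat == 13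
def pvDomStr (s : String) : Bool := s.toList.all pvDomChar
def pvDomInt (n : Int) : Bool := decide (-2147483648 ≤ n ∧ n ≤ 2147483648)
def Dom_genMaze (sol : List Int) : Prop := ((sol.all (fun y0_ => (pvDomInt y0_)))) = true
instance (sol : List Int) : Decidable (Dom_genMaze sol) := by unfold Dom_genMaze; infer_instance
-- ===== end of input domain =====

-- B walks via a delta dictionary into a SET of visited cells and builds the grid by
-- membership tests in one comprehension — no moves list, no shift pass, no grid mutation
-- (objective: alternative decomposition; same cost). Equivalence is about the return value
-- only (A mutates only its own local lists).

-- shared helper: maze[i][j] = v.  A only ever indexes with in-range nonnegative i, j,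
-- so Int.toNat is exact here (no negative wraparound reached).
def setCell (m : List (List Int)) (i j v : Int) : List (List Int) :=
  m.set i.toNat ((m.getD i.toNat []).set j.toNat v)

-- ===== PORT A =====
def stepA (st : Int × Int × Int × Int × Int × Int × List (Int × Int)) (x : Int) :
    Int × Int × Int × Int × Int × Int × List (Int × Int) :=
  let (i, j, imin, jmin, imax, jmax, moves) := st
  if x = 0 then
    (i, j - 1, imin, if jmin > j - 1 then j - 1 else jmin, imax, jmax, moves ++ [(i, j - 1)])
  else if x = 1 then
    (i, j + 1, imin, jmin, imax, if jmax < j + 1 then j + 1 else jmax, moves ++ [(i, j + 1)])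
  else if x = 2 then
    (i - 1, j, if imin > i - 1 then i - 1 else imin, jmin, imax, jmax, moves ++ [(i - 1, j)])
  else if x = 3 then
    (i + 1, j, imin, jmin, if imax < i + 1 then i + 1 else imax, jmax, moves ++ [(i + 1, j)])
  else st

def genMaze (sol : List Int) : List (List Int) :=
  match sol.foldl stepA (0, 0, 0, 0, 0, 0, [((0 : Int), (0 : Int))]) with
  | (_, _, imin, jmin, imax, jmax, moves) =>
    let mi := if imin < 0 then (moves.map (fun p => (p.1 - imin, p.2)), imax - imin) else (moves, imax)
    let mj := if jmin < 0 then (mi.1.map (fun p => (p.1, p.2 - jmin)), jmax - jmin) else (mi.1, jmax)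
    let maze := (PySem.List.pyRange 0 (mi.2 + 1) 1).foldl
        (fun acc _ => acc ++ [List.replicate (mj.2 + 1).toNat (0 : Int)]) []
    let maze := mj.1.foldl (fun mz p => setCell mz p.1 p.2 1) maze
    let p0 := mj.1.headD (0, 0)
    setCell maze p0.1 p0.2 8

-- ===== PORT B =====
-- the DELTA dict of Source B, literal
def deltaDict : PySem.Dict Int (Int × Int) :=
  ((((PySem.Dict.empty).insert 0 ((0 : Int), (-1 : Int))).insert 1 (0, 1)).insert 2 (-1, 0)).insert 3 (1, 0)

-- one iteration of Source B's walk: 'if x in DELTA: di,dj = DELTA[x]; i += di; j += dj; cells.add((i,j))'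
def stepB (st : (Int × Int) × PySem.Set (Int × Int)) (x : Int) : (Int × Int) × PySem.Set (Int × Int) :=
  match deltaDict.get? x with
  | none => st
  | some (di, dj) => ((st.1.1 + di, st.1.2 + dj), PySem.Set.add st.2 (st.1.1 + di, st.1.2 + dj))

-- Python min()/max() over a nonempty collection of ints (the only way Source B calls them)
def pyMin (l : List Int) : Int := match l with | [] => 0 | h :: t => t.foldl min h
def pyMax (l : List Int) : Int := match l with | [] => 0 | h :: t => t.foldl max h

def genMaze_alt (sol : List Int) : List (List Int) :=
  let cells := (sol.foldl stepB ((0, 0), PySem.Set.ofList [((0 : Int), (0 : Int))])).2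
  let imin := pyMin (cells.map Prod.fst)
  let imax := pyMax (cells.map Prod.fst)
  let jmin := pyMin (cells.map Prod.snd)
  let jmax := pyMax (cells.map Prod.snd)
  (PySem.List.pyRange 0 (imax - imin + 1) 1).map (fun r =>
    (PySem.List.pyRange 0 (jmax - jmin + 1) 1).map (fun c =>
      if (r + imin, c + jmin) = ((0 : Int), (0 : Int)) then (8 : Int)
      else if (r + imin, c + jmin) ∈ cells then 1 else 0))

-- ===== PRECONDITION & SPEC =====
def Spec_genMaze (sol : List Int) (out : List (List Int)) : Prop := out = genMaze_alt sol
instance (sol : List Int) (out : List (List Int)) : Decidable (Spec_genMaze sol out) := by unfold Spec_genMaze; infer_instance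

-- ===== CLAIM (what is proved, stated in full; the proofs are below) =====
def Claim_equal_genMaze : Prop := ∀ (sol : List Int), Dom_genMaze sol → Spec_genMaze sol (genMaze sol)

-- ===== LEMMAS AND PROOFS =====

-- proof-side helper: Source B's walk with the raw (duplicate-keeping) list of cells
def stepL (st : (Int × Int) × List (Int × Int)) (x : Int) : (Int × Int) × List (Int × Int) :=
  let ((i, j), ms) := st
  if x = 0 then ((i, j - 1), ms ++ [(i, j - 1)])
  else if x = 1 then ((i, j + 1), ms ++ [(i, j + 1)])
  else if x = 2 then ((i - 1, j), ms ++ [(i - 1, j)])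
  else if x = 3 then ((i + 1, j), ms ++ [(i + 1, j)])
  else st

theorem foldl_min_le_init : ∀ (t : List Int) (a : Int), t.foldl min a ≤ a := by
  intro t
  induction t with
  | nil => intro a; simp
  | cons h t ih => intro a; exact le_trans (ih (min a h)) (min_le_left a h)

theorem foldl_min_le_mem : ∀ (t : List Int) (a x : Int), x ∈ t → t.foldl min a ≤ x := by
  intro t
  induction t with
  | nil => intro a x hx; simp at hx
  | cons h t ih =>
    intro a x hx
    rcases List.mem_cons.mp hx with rfl | hx
    · exact le_trans (foldl_min_le_init t (min a x)) (min_le_right a x)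
    · exact ih (min a h) x hx

theorem init_le_foldl_max : ∀ (t : List Int) (a : Int), a ≤ t.foldl max a := by
  intro t
  induction t with
  | nil => intro a; simp
  | cons h t ih => intro a; exact le_trans (le_max_left a h) (ih (max a h))

theorem mem_le_foldl_max : ∀ (t : List Int) (a x : Int), x ∈ t → x ≤ t.foldl max a := by
  intro t
  induction t with
  | nil => intro a x hx; simp at hx
  | cons h t ih =>
    intro a x hx
    rcases List.mem_cons.mp hx with rfl | hx
    · exact le_trans (le_max_right a x) (init_le_foldl_max t (max a x))
    · exact ih (max a h) x hx

theorem pyMin_le (l : List Int) (x : Int) (hx : x ∈ l) : pyMin l ≤ x := by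
  cases l with
  | nil => simp at hx
  | cons h t =>
    rcases List.mem_cons.mp hx with rfl | hx
    · exact foldl_min_le_init t x
    · exact foldl_min_le_mem t h x hx

theorem le_pyMax (l : List Int) (x : Int) (hx : x ∈ l) : x ≤ pyMax l := by
  cases l with
  | nil => simp at hx
  | cons h t =>
    rcases List.mem_cons.mp hx with rfl | hx
    · exact init_le_foldl_max t x
    · exact mem_le_foldl_max t h x hx

theorem foldl_min_mem : ∀ (t : List Int) (a : Int), t.foldl min a = a ∨ t.foldl min a ∈ t := by
  intro t
  induction t with
  | nil => intro a; left; rfl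
  | cons h t ih =>
    intro a
    rw [List.foldl_cons]
    rcases ih (min a h) with he | hm
    · rw [he]
      rcases min_choice a h with h1 | h1
      · left; exact h1
      · right; rw [h1]; exact List.mem_cons_self
    · right; exact List.mem_cons_of_mem h hm

theorem pyMin_mem (l : List Int) (hl : l ≠ []) : pyMin l ∈ l := by
  cases l with
  | nil => exact absurd rfl hl
  | cons h t =>
    rcases foldl_min_mem t h with he | hm
    · rw [pyMin, he]; exact List.mem_cons_self
    · exact List.mem_cons_of_mem h hm

theorem foldl_max_mem : ∀ (t : List Int) (a : Int), t.foldl max a = a ∨ t.foldl max a ∈ t := by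
  intro t
  induction t with
  | nil => intro a; left; rfl
  | cons h t ih =>
    intro a
    rw [List.foldl_cons]
    rcases ih (max a h) with he | hm
    · rw [he]
      rcases max_choice a h with h1 | h1
      · left; exact h1
      · right; rw [h1]; exact List.mem_cons_self
    · right; exact List.mem_cons_of_mem h hm

theorem pyMax_mem (l : List Int) (hl : l ≠ []) : pyMax l ∈ l := by
  cases l with
  | nil => exact absurd rfl hl
  | cons h t =>
    rcases foldl_max_mem t h with he | hm
    · rw [pyMax, he]; exact List.mem_cons_self
    · exact List.mem_cons_of_mem h hm

theorem pyMin_eq_of_mem_iff (l l' : List Int) (hl : l ≠ []) (hl' : l' ≠ [])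
    (h : ∀ x, x ∈ l ↔ x ∈ l') : pyMin l = pyMin l' := by
  have h1 := pyMin_le l' (pyMin l) ((h _).mp (pyMin_mem l hl))
  have h2 := pyMin_le l (pyMin l') ((h _).mpr (pyMin_mem l' hl'))
  omega

theorem pyMax_eq_of_mem_iff (l l' : List Int) (hl : l ≠ []) (hl' : l' ≠ [])
    (h : ∀ x, x ∈ l ↔ x ∈ l') : pyMax l = pyMax l' := by
  have h1 := le_pyMax l' (pyMin l) ((h _).mp (pyMin_mem l hl))
  have h2 := le_pyMax l (pyMax l') ((h _).mpr (pyMax_mem l' hl'))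
  have h3 := le_pyMax l' (pyMax l) ((h _).mp (pyMax_mem l hl))
  omega

theorem pyMin_append (l : List Int) (hl : l ≠ []) (a : Int) :
    pyMin (l ++ [a]) = min (pyMin l) a := by
  cases l with
  | nil => exact absurd rfl hl
  | cons h t => simp [pyMin, List.foldl_append]

theorem pyMax_append (l : List Int) (hl : l ≠ []) (a : Int) :
    pyMax (l ++ [a]) = max (pyMax l) a := by
  cases l with
  | nil => exact absurd rfl hl
  | cons h t => simp [pyMax, List.foldl_append]

-- bounds of the appended cell list, for one loop step appending the cell (c, d)
theorem bounds_append (ms : List (Int × Int)) (hne : ms ≠ []) (c d : Int) :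
    pyMin ((ms ++ [(c, d)]).map Prod.fst) = min (pyMin (ms.map Prod.fst)) c ∧
    pyMin ((ms ++ [(c, d)]).map Prod.snd) = min (pyMin (ms.map Prod.snd)) d ∧
    pyMax ((ms ++ [(c, d)]).map Prod.fst) = max (pyMax (ms.map Prod.fst)) c ∧
    pyMax ((ms ++ [(c, d)]).map Prod.snd) = max (pyMax (ms.map Prod.snd)) d := by
  have h1 : ms.map Prod.fst ≠ [] := by simpa using hne
  have h2 : ms.map Prod.snd ≠ [] := by simpa using hne
  refine ⟨?_, ?_, ?_, ?_⟩ <;>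
    simp [List.map_append, pyMin_append _ h1, pyMin_append _ h2,
      pyMax_append _ h1, pyMax_append _ h2]

-- the main loop invariant: A's running extrema are the global extrema of the cell list
theorem fold_inv : ∀ (sol : List Int) (i j : Int) (ms : List (Int × Int)),
    ms ≠ [] → (i, j) ∈ ms →
    sol.foldl stepA (i, j, pyMin (ms.map Prod.fst), pyMin (ms.map Prod.snd),
      pyMax (ms.map Prod.fst), pyMax (ms.map Prod.snd), ms)
    = ((sol.foldl stepL ((i, j), ms)).1.1, (sol.foldl stepL ((i, j), ms)).1.2,
       pyMin (((sol.foldl stepL ((i, j), ms)).2).map Prod.fst),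
       pyMin (((sol.foldl stepL ((i, j), ms)).2).map Prod.snd),
       pyMax (((sol.foldl stepL ((i, j), ms)).2).map Prod.fst),
       pyMax (((sol.foldl stepL ((i, j), ms)).2).map Prod.snd),
       (sol.foldl stepL ((i, j), ms)).2) := by
  intro sol
  induction sol with
  | nil => intro i j ms hne hmem; rfl
  | cons x rest ih =>
    intro i j ms hne hmem
    have hif : pyMin (ms.map Prod.fst) ≤ i := pyMin_le _ i (List.mem_map_of_mem hmem)
    have hjf : pyMin (ms.map Prod.snd) ≤ j := pyMin_le _ j (List.mem_map_of_mem hmem)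
    have hiF : i ≤ pyMax (ms.map Prod.fst) := le_pyMax _ i (List.mem_map_of_mem hmem)
    have hjF : j ≤ pyMax (ms.map Prod.snd) := le_pyMax _ j (List.mem_map_of_mem hmem)
    by_cases h0 : x = 0
    · obtain ⟨b1, b2, b3, b4⟩ := bounds_append ms hne i (j - 1)
      simp only [List.foldl_cons, stepA, stepL, h0]
      rw [show (if pyMin (ms.map Prod.snd) > j - 1 then j - 1 else pyMin (ms.map Prod.snd))
            = pyMin ((ms ++ [(i, j - 1)]).map Prod.snd) by rw [b2]; omega,
          show pyMin (ms.map Prod.fst) = pyMin ((ms ++ [(i, j - 1)]).map Prod.fst) by rw [b1]; omega,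
          show pyMax (ms.map Prod.fst) = pyMax ((ms ++ [(i, j - 1)]).map Prod.fst) by rw [b3]; omega,
          show pyMax (ms.map Prod.snd) = pyMax ((ms ++ [(i, j - 1)]).map Prod.snd) by rw [b4]; omega]
      exact ih i (j - 1) (ms ++ [(i, j - 1)]) (by simp) (by simp)
    · by_cases h1 : x = 1
      · obtain ⟨b1, b2, b3, b4⟩ := bounds_append ms hne i (j + 1)
        simp only [List.foldl_cons, stepA, stepL, h1]
        rw [show (if pyMax (ms.map Prod.snd) < j + 1 then j + 1 else pyMax (ms.map Prod.snd))
              = pyMax ((ms ++ [(i, j + 1)]).map Prod.snd) by rw [b4]; omega,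
            show pyMin (ms.map Prod.fst) = pyMin ((ms ++ [(i, j + 1)]).map Prod.fst) by rw [b1]; omega,
            show pyMin (ms.map Prod.snd) = pyMin ((ms ++ [(i, j + 1)]).map Prod.snd) by rw [b2]; omega,
            show pyMax (ms.map Prod.fst) = pyMax ((ms ++ [(i, j + 1)]).map Prod.fst) by rw [b3]; omega]
        exact ih i (j + 1) (ms ++ [(i, j + 1)]) (by simp) (by simp)
      · by_cases h2 : x = 2
        · obtain ⟨b1, b2, b3, b4⟩ := bounds_append ms hne (i - 1) j
          simp only [List.foldl_cons, stepA, stepL, h2]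
          rw [show (if pyMin (ms.map Prod.fst) > i - 1 then i - 1 else pyMin (ms.map Prod.fst))
                = pyMin ((ms ++ [(i - 1, j)]).map Prod.fst) by rw [b1]; omega,
              show pyMin (ms.map Prod.snd) = pyMin ((ms ++ [(i - 1, j)]).map Prod.snd) by rw [b2]; omega,
              show pyMax (ms.map Prod.fst) = pyMax ((ms ++ [(i - 1, j)]).map Prod.fst) by rw [b3]; omega,
              show pyMax (ms.map Prod.snd) = pyMax ((ms ++ [(i - 1, j)]).map Prod.snd) by rw [b4]; omega]
          exact ih (i - 1) j (ms ++ [(i - 1, j)]) (by simp) (by simp)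
        · by_cases h3 : x = 3
          · obtain ⟨b1, b2, b3, b4⟩ := bounds_append ms hne (i + 1) j
            simp only [List.foldl_cons, stepA, stepL, h3]
            rw [show (if pyMax (ms.map Prod.fst) < i + 1 then i + 1 else pyMax (ms.map Prod.fst))
                  = pyMax ((ms ++ [(i + 1, j)]).map Prod.fst) by rw [b3]; omega,
                show pyMin (ms.map Prod.fst) = pyMin ((ms ++ [(i + 1, j)]).map Prod.fst) by rw [b1]; omega,
                show pyMin (ms.map Prod.snd) = pyMin ((ms ++ [(i + 1, j)]).map Prod.snd) by rw [b2]; omega,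
                show pyMax (ms.map Prod.snd) = pyMax ((ms ++ [(i + 1, j)]).map Prod.snd) by rw [b4]; omega]
            exact ih (i + 1) j (ms ++ [(i + 1, j)]) (by simp) (by simp)
          · simp only [List.foldl_cons, stepA, stepL, if_neg h0, if_neg h1, if_neg h2, if_neg h3]
            exact ih i j ms hne hmem

-- the list walk only appends: the initial cell list is a prefix of the final one
theorem stepL_prefix : ∀ (sol : List Int) (st : (Int × Int) × List (Int × Int)),
    ∃ tl, (sol.foldl stepL st).2 = st.2 ++ tl := by
  intro sol
  induction sol with
  | nil => intro st; exact ⟨[], by simp⟩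
  | cons x rest ih =>
    intro st
    obtain ⟨⟨i, j⟩, ms⟩ := st
    obtain ⟨u, hu⟩ : ∃ u, (stepL ((i, j), ms) x).2 = ms ++ u := by
      simp only [stepL]
      split_ifs <;> first | exact ⟨_, rfl⟩ | exact ⟨[], by simp⟩
    obtain ⟨tl, htl⟩ := ih (stepL ((i, j), ms) x)
    exact ⟨u ++ tl, by rw [List.foldl_cons, htl, hu, List.append_assoc]⟩

-- B's set walk is the list walk followed by dedup
theorem setfold : ∀ (sol : List Int) (i j : Int) (ms : List (Int × Int)),
    sol.foldl stepB ((i, j), PySem.Set.ofList ms)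
    = ((sol.foldl stepL ((i, j), ms)).1, PySem.Set.ofList (sol.foldl stepL ((i, j), ms)).2) := by
  intro sol
  induction sol with
  | nil => intro i j ms; rfl
  | cons x rest ih =>
    intro i j ms
    simp only [List.foldl_cons]
    by_cases h0 : x = 0
    · rw [show stepB ((i, j), PySem.Set.ofList ms) x = ((i, j - 1), PySem.Set.ofList (ms ++ [(i, j - 1)])) by
        simp [stepB, deltaDict, h0, PySem.Dict.get?_insert, PySem.Set.ofList_append_singleton, sub_eq_add_neg],
        show stepL ((i, j), ms) x = ((i, j - 1), ms ++ [(i, j - 1)]) by simp [stepL, h0]]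
      exact ih i (j - 1) (ms ++ [(i, j - 1)])
    · by_cases h1 : x = 1
      · rw [show stepB ((i, j), PySem.Set.ofList ms) x = ((i, j + 1), PySem.Set.ofList (ms ++ [(i, j + 1)])) by
          simp [stepB, deltaDict, h1, PySem.Dict.get?_insert, PySem.Set.ofList_append_singleton],
          show stepL ((i, j), ms) x = ((i, j + 1), ms ++ [(i, j + 1)]) by simp [stepL, h1]]
        exact ih i (j + 1) (ms ++ [(i, j + 1)])
      · by_cases h2 : x = 2
        · rw [show stepB ((i, j), PySem.Set.ofList ms) x = ((i - 1, j), PySem.Set.ofList (ms ++ [(i - 1, j)])) by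
            simp [stepB, deltaDict, h2, PySem.Dict.get?_insert, PySem.Set.ofList_append_singleton, sub_eq_add_neg],
            show stepL ((i, j), ms) x = ((i - 1, j), ms ++ [(i - 1, j)]) by simp [stepL, h2]]
          exact ih (i - 1) j (ms ++ [(i - 1, j)])
        · by_cases h3 : x = 3
          · rw [show stepB ((i, j), PySem.Set.ofList ms) x = ((i + 1, j), PySem.Set.ofList (ms ++ [(i + 1, j)])) by
              simp [stepB, deltaDict, h3, PySem.Set.ofList_append_singleton],
              show stepL ((i, j), ms) x = ((i + 1, j), ms ++ [(i + 1, j)]) by simp [stepL, h3]]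
            exact ih (i + 1) j (ms ++ [(i + 1, j)])
          · rw [show stepB ((i, j), PySem.Set.ofList ms) x = ((i, j), PySem.Set.ofList ms) by
              simp [stepB, deltaDict, h0, h1, h2, h3, PySem.Dict.get?_insert, PySem.Dict.get?_empty],
              show stepL ((i, j), ms) x = ((i, j), ms) by simp [stepL, h0, h1, h2, h3]]
            exact ih i j ms

-- grid-as-a-function view used to characterise both constructions
def mk (H W : Nat) (f : Nat → Nat → Int) : List (List Int) :=
  (List.range H).map (fun r => (List.range W).map (fun c => f r c))

theorem mk_congr (H W : Nat) (f g : Nat → Nat → Int) (h : ∀ r c, r < H → c < W → f r c = g r c) :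
    mk H W f = mk H W g := by
  unfold mk
  refine List.map_congr_left (fun r hr => List.map_congr_left (fun c hc => ?_))
  exact h r c (List.mem_range.mp hr) (List.mem_range.mp hc)

theorem mk_set (H W : Nat) (f : Nat → Nat → Int) (a b v : Int)
    (ha0 : 0 ≤ a) (ha : a < H) (hb0 : 0 ≤ b) (hb : b < W) :
    setCell (mk H W f) a b v
      = mk H W (fun r c => if (r : Int) = a ∧ (c : Int) = b then v else f r c) := by
  have haN : a.toNat < H := by omega
  have hbN : b.toNat < W := by omega
  unfold setCell mk
  have hgd : ((List.range H).map (fun r => (List.range W).map (fun c => f r c))).getD a.toNat []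
      = (List.range W).map (fun c => f a.toNat c) := by
    rw [List.getD_eq_getElem?_getD, List.getElem?_map, List.getElem?_range haN]
    rfl
  rw [hgd]
  apply List.ext_getElem
  · simp
  · intro r h1 h2
    simp only [List.getElem_set, List.getElem_map, List.getElem_range]
    by_cases hr : a.toNat = r
    · subst hr
      rw [if_pos rfl]
      apply List.ext_getElem
      · simp
      · intro c hc1 hc2
        simp only [List.getElem_set, List.getElem_map, List.getElem_range]
        by_cases hcb : b.toNat = c
        · rw [if_pos hcb, if_pos (by omega)]
        · rw [if_neg hcb, if_neg (by omega)]
    · rw [if_neg hr]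
      apply List.map_congr_left
      intro c hc
      rw [if_neg (by omega)]

theorem paint : ∀ (L : List (Int × Int)) (H W : Nat) (f : Nat → Nat → Int),
    (∀ p ∈ L, 0 ≤ p.1 ∧ p.1 < H ∧ 0 ≤ p.2 ∧ p.2 < W) →
    L.foldl (fun mz p => setCell mz p.1 p.2 1) (mk H W f)
      = mk H W (fun r c => if ((r : Int), (c : Int)) ∈ L then 1 else f r c) := by
  intro L
  induction L with
  | nil => intro H W f _; simp [mk]
  | cons p L ih =>
    intro H W f hb
    obtain ⟨h1, h2, h3, h4⟩ := hb p List.mem_cons_self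
    rw [List.foldl_cons, mk_set H W f p.1 p.2 1 h1 h2 h3 h4,
      ih H W _ (fun q hq => hb q (List.mem_cons_of_mem p hq))]
    apply mk_congr
    intro r c _ _
    by_cases hm : ((r : Int), (c : Int)) ∈ L
    · simp [hm]
    · by_cases hp : (r : Int) = p.1 ∧ (c : Int) = p.2
      · rw [if_neg hm, if_pos hp, if_pos (List.mem_cons.mpr (Or.inl
          (by obtain ⟨hp1, hp2⟩ := hp; exact Prod.ext hp1 hp2)))]
      · have : ¬ ((r : Int), (c : Int)) ∈ p :: L := by
          intro hc
          rcases List.mem_cons.mp hc with he | he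
          · exact hp ⟨congrArg Prod.fst he, congrArg Prod.snd he⟩
          · exact hm he
        rw [if_neg hm, if_neg hp, if_neg this]

-- A's zero-grid builder produces a constant mk
theorem foldl_append_const : ∀ (l : List Int) (acc : List (List Int)) (row : List Int),
    l.foldl (fun a _ => a ++ [row]) acc = acc ++ List.replicate l.length row := by
  intro l
  induction l with
  | nil => intro acc row; simp
  | cons x t ih =>
    intro acc row
    rw [List.foldl_cons, ih, List.append_assoc, List.length_cons, List.replicate_succ]
    rfl

theorem zeros_eq_mk (H W : Nat) :
    List.replicate H (List.replicate W (0 : Int)) = mk H W (fun _ _ => 0) := by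
  unfold mk
  apply List.ext_getElem <;> simp

-- ===== VERDICT (by name: the statement is the Claim_ definition above) =====
theorem genMaze_spec : Claim_equal_genMaze := by
  intro sol _
  show genMaze sol = genMaze_alt sol
  -- relate A's fold to the list walk
  have hA := fold_inv sol 0 0 [((0 : Int), (0 : Int))] (by simp) (by simp)
  have hinit : ((0 : Int), (0 : Int), pyMin ([((0 : Int), (0 : Int))].map Prod.fst),
      pyMin ([((0 : Int), (0 : Int))].map Prod.snd), pyMax ([((0 : Int), (0 : Int))].map Prod.fst),
      pyMax ([((0 : Int), (0 : Int))].map Prod.snd), [((0 : Int), (0 : Int))])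
      = ((0 : Int), (0 : Int), (0 : Int), (0 : Int), (0 : Int), (0 : Int), [((0 : Int), (0 : Int))]) := rfl
  rw [hinit] at hA
  -- relate B's fold to the list walk
  have hB := setfold sol 0 0 [((0 : Int), (0 : Int))]
  -- facts about the list walk's cell list
  obtain ⟨tl, htl⟩ := stepL_prefix sol ((0, 0), [((0 : Int), (0 : Int))])
  set ms := (sol.foldl stepL ((0, 0), [((0 : Int), (0 : Int))])).2 with hms
  have hne : ms ≠ [] := by rw [htl]; simp
  have h00 : ((0 : Int), (0 : Int)) ∈ ms := by rw [htl]; simp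
  have hhead : ms.headD (0, 0) = ((0 : Int), (0 : Int)) := by rw [htl]; rfl
  unfold genMaze genMaze_alt
  rw [hA, hB]
  dsimp only
  -- names for the extrema of the raw cell list
  set I := pyMin (ms.map Prod.fst) with hI
  set J := pyMin (ms.map Prod.snd) with hJ
  set Imx := pyMax (ms.map Prod.fst) with hImx
  set Jmx := pyMax (ms.map Prod.snd) with hJmx
  have hofmem : ((0 : Int), (0 : Int)) ∈ PySem.Set.ofList ms := (PySem.Set.mem_ofList _ _).mpr h00
  have hof_ne : PySem.Set.ofList ms ≠ [] := List.ne_nil_of_mem hofmem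
  have hmapiff1 : ∀ x : Int, x ∈ (PySem.Set.ofList ms).map Prod.fst ↔ x ∈ ms.map Prod.fst := by
    intro x
    simp only [List.mem_map]
    exact ⟨fun ⟨p, hp, he⟩ => ⟨p, (PySem.Set.mem_ofList _ _).mp hp, he⟩,
           fun ⟨p, hp, he⟩ => ⟨p, (PySem.Set.mem_ofList _ _).mpr hp, he⟩⟩
  have hmapiff2 : ∀ x : Int, x ∈ (PySem.Set.ofList ms).map Prod.snd ↔ x ∈ ms.map Prod.snd := by
    intro x
    simp only [List.mem_map]
    exact ⟨fun ⟨p, hp, he⟩ => ⟨p, (PySem.Set.mem_ofList _ _).mp hp, he⟩,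
           fun ⟨p, hp, he⟩ => ⟨p, (PySem.Set.mem_ofList _ _).mpr hp, he⟩⟩
  have hne1 : (PySem.Set.ofList ms).map Prod.fst ≠ [] := by simpa using hof_ne
  have hne2 : (PySem.Set.ofList ms).map Prod.snd ≠ [] := by simpa using hof_ne
  have hne1' : ms.map Prod.fst ≠ [] := by simpa using hne
  have hne2' : ms.map Prod.snd ≠ [] := by simpa using hne
  have e1 : pyMin ((PySem.Set.ofList ms).map Prod.fst) = I := pyMin_eq_of_mem_iff _ _ hne1 hne1' hmapiff1
  have e2 : pyMin ((PySem.Set.ofList ms).map Prod.snd) = J := pyMin_eq_of_mem_iff _ _ hne2 hne2' hmapiff2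
  have e3 : pyMax ((PySem.Set.ofList ms).map Prod.fst) = Imx := pyMax_eq_of_mem_iff _ _ hne1 hne1' hmapiff1
  have e4 : pyMax ((PySem.Set.ofList ms).map Prod.snd) = Jmx := pyMax_eq_of_mem_iff _ _ hne2 hne2' hmapiff2
  rw [e1, e2, e3, e4]
  -- basic bounds
  have hI0 : I ≤ 0 := pyMin_le _ 0 (List.mem_map_of_mem h00)
  have hJ0 : J ≤ 0 := pyMin_le _ 0 (List.mem_map_of_mem h00)
  have hImx0 : 0 ≤ Imx := le_pyMax _ 0 (List.mem_map_of_mem h00)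
  have hJmx0 : 0 ≤ Jmx := le_pyMax _ 0 (List.mem_map_of_mem h00)
  -- normalise A's two conditional shifts into one unconditional map
  have hstep1 : (if I < 0 then (ms.map (fun p => (p.1 - I, p.2)), Imx - I) else (ms, Imx))
      = (ms.map (fun p => (p.1 - I, p.2)), Imx - I) := by
    by_cases h : I < 0
    · rw [if_pos h]
    · have : I = 0 := by omega
      rw [if_neg h, this]
      simp
  have hstep2 : (if J < 0 then ((ms.map (fun p => (p.1 - I, p.2))).map (fun p => (p.1, p.2 - J)), Jmx - J)
        else (ms.map (fun p => (p.1 - I, p.2)), Jmx))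
      = (ms.map (fun p => (p.1 - I, p.2 - J)), Jmx - J) := by
    by_cases h : J < 0
    · rw [if_pos h, List.map_map]
      rfl
    · have : J = 0 := by omega
      rw [if_neg h, this]
      simp
  rw [hstep1]
  dsimp only
  rw [hstep2]
  dsimp only
  -- grid dimensions
  set H := (Imx - I + 1).toNat with hH
  set W := (Jmx - J + 1).toNat with hW
  have hHc : (H : Int) = Imx - I + 1 := Int.toNat_of_nonneg (by omega)
  have hWc : (W : Int) = Jmx - J + 1 := Int.toNat_of_nonneg (by omega)
  -- the zero grid is a constant mk
  have hzero : (PySem.List.pyRange 0 (Imx - I + 1) 1).foldl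
      (fun acc _ => acc ++ [List.replicate W (0 : Int)]) [] = mk H W (fun _ _ => 0) := by
    rw [foldl_append_const, List.nil_append, PySem.List.length_pyRange_one, sub_zero, ← hH,
      zeros_eq_mk]
  rw [hzero]
  -- paint the shifted cells
  have hbounds : ∀ p ∈ ms.map (fun p => (p.1 - I, p.2 - J)),
      0 ≤ p.1 ∧ p.1 < H ∧ 0 ≤ p.2 ∧ p.2 < W := by
    intro p hp
    obtain ⟨q, hq, rfl⟩ := List.mem_map.mp hp
    have b1 : I ≤ q.1 := pyMin_le _ _ (List.mem_map_of_mem hq)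
    have b2 : q.1 ≤ Imx := le_pyMax _ _ (List.mem_map_of_mem hq)
    have b3 : J ≤ q.2 := pyMin_le _ _ (List.mem_map_of_mem hq)
    have b4 : q.2 ≤ Jmx := le_pyMax _ _ (List.mem_map_of_mem hq)
    refine ⟨by omega, by rw [hHc]; omega, by omega, by rw [hWc]; omega⟩
  rw [paint _ H W _ hbounds]
  -- the start cell of the shifted list
  have hsh_head : ((ms.map (fun p => (p.1 - I, p.2 - J))).headD (0, 0)) = (0 - I, 0 - J) := by
    rw [htl]
    rfl
  rw [hsh_head]
  dsimp only
  rw [mk_set H W _ (0 - I) (0 - J) 8 (by omega) (by rw [hHc]; omega) (by omega) (by rw [hWc]; omega)]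
  -- B's comprehension is a mk of the same dimensions
  have hBgrid : (PySem.List.pyRange 0 (Imx - I + 1) 1).map (fun r =>
      (PySem.List.pyRange 0 (Jmx - J + 1) 1).map (fun c =>
        if (r + I, c + J) = ((0 : Int), (0 : Int)) then (8 : Int)
        else if (r + I, c + J) ∈ PySem.Set.ofList ms then 1 else 0))
      = mk H W (fun r c =>
        if ((r : Int) + I, (c : Int) + J) = ((0 : Int), (0 : Int)) then (8 : Int)
        else if ((r : Int) + I, (c : Int) + J) ∈ PySem.Set.ofList ms then 1 else 0) := by
    simp only [PySem.List.pyRange_one, sub_zero, List.map_map, mk]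
    apply List.map_congr_left
    intro r _
    simp only [Function.comp_def, zero_add]
    rfl
  rw [hBgrid]
  -- pointwise identification of the two grids
  apply mk_congr
  intro r c _ _
  have hcond : ((r : Int) = 0 - I ∧ (c : Int) = 0 - J) ↔ ((r : Int) + I, (c : Int) + J) = ((0 : Int), (0 : Int)) := by
    rw [Prod.mk.injEq]
    omega
  have hmem : ((r : Int), (c : Int)) ∈ ms.map (fun p => (p.1 - I, p.2 - J))
      ↔ ((r : Int) + I, (c : Int) + J) ∈ PySem.Set.ofList ms := by
    rw [PySem.Set.mem_ofList _ _, List.mem_map]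
    constructor
    · rintro ⟨p, hp, he⟩
      rw [Prod.mk.injEq] at he
      have hpe : p = ((r : Int) + I, (c : Int) + J) := Prod.ext (by omega) (by omega)
      exact hpe ▸ hp
    · intro hm
      exact ⟨((r : Int) + I, (c : Int) + J), hm, by rw [Prod.mk.injEq]; omega⟩
  by_cases h8 : (r : Int) = 0 - I ∧ (c : Int) = 0 - J
  · rw [if_pos h8, if_pos (hcond.mp h8)]
  · rw [if_neg h8, if_neg (fun hc => h8 (hcond.mpr hc))]
    by_cases h1 : ((r : Int), (c : Int)) ∈ ms.map (fun p => (p.1 - I, p.2 - J))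
    · rw [if_pos h1, if_pos (hmem.mp h1)]
    · rw [if_neg h1, if_neg (fun hc => h1 (hmem.mpr hc))]
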